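-- pv_equiv track=rewrite | github.com/bjornslib/cobuilder-harness | cobuilder/engine/dashboard.py | determine_pipeline_stage
-- ===== SOURCE A (Python) =====
-- _ACTIVE_STATUSES = {"active", "impl_complete", "failed"}
--
-- _VALIDATED_STATUS = "validated"
--
-- _FINALIZE_HANDLERS = {"finalize"}
--
-- _FINALIZE_SHAPES = {"Msquare"}
--
-- _CODERGEN_HANDLERS = {"codergen"}
--
-- _VALIDATION_HANDLERS = {"wait.human"}
--
-- def determine_pipeline_stage(nodes: list[dict]) -> str:
--     """Determine the overall pipeline lifecycle stage.
--
--     Stage logic (in priority order):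
--     - FINALIZED: all hexagon (wait.human) nodes are validated, OR the
--       finalize (Msquare) node is validated.
--     - VALIDATION: at least one hexagon node is active or validated,
--       or all codergen nodes are impl_complete/validated.
--     - IMPLEMENTATION: at least one codergen node is active or impl_complete.
--     - DEFINITION: all nodes are pending (only start may be validated).
--     """
--     codergen_nodes = []
--     hexagon_nodes = []
--     finalize_nodes = []
--
--     for node in nodes:
--         attrs = node["attrs"]
--         handler = attrs.get("handler", "")
--         shape = attrs.get("shape", "")
--         if handler in _CODERGEN_HANDLERS:
--             codergen_nodes.append(attrs)
--         elif handler in _VALIDATION_HANDLERS: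
--             hexagon_nodes.append(attrs)
--         elif handler in _FINALIZE_HANDLERS or shape in _FINALIZE_SHAPES:
--             finalize_nodes.append(attrs)
--
--     # Check FINALIZED
--     if finalize_nodes:
--         if any(a.get("status", "pending") == _VALIDATED_STATUS for a in finalize_nodes):
--             return "Finalized"
--     if hexagon_nodes and all(
--         a.get("status", "pending") == _VALIDATED_STATUS for a in hexagon_nodes
--     ):
--         return "Finalized"
--
--     # Check VALIDATION
--     if hexagon_nodes:
--         hexagon_statuses = {a.get("status", "pending") for a in hexagon_nodes}
--         if _ACTIVE_STATUSES & hexagon_statuses or _VALIDATED_STATUS in hexagon_statuses: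
--             return "Validation"
--     if codergen_nodes and all(
--         a.get("status", "pending") in ("impl_complete", "validated")
--         for a in codergen_nodes
--     ):
--         if codergen_nodes:
--             return "Validation"
--
--     # Check IMPLEMENTATION
--     if codergen_nodes:
--         codergen_statuses = {a.get("status", "pending") for a in codergen_nodes}
--         if _ACTIVE_STATUSES & codergen_statuses:
--             return "Implementation"
--
--     return "Definition"
-- ===== SOURCE B (Python) =====
-- def determine_pipeline_stage(nodes: list[dict]) -> str:
--     """Single pass over nodes keeping scalar accumulators instead of node lists."""
--     cg_n = hx_n = fin_validated = 0
--     hx_all_val = cg_all_ok = True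
--     hx_any_hot = cg_any_active = False
--     for node in nodes:
--         attrs = node["attrs"]
--         h = attrs.get("handler", "")
--         s = attrs.get("status", "pending")
--         if h == "codergen":
--             cg_n += 1
--             cg_all_ok = cg_all_ok and s in ("impl_complete", "validated")
--             cg_any_active = cg_any_active or s in ("active", "impl_complete", "failed")
--         elif h == "wait.human":
--             hx_n += 1
--             hx_all_val = hx_all_val and s == "validated"
--             hx_any_hot = hx_any_hot or s in ("active", "impl_complete", "failed", "validated")
--         elif h == "finalize" or attrs.get("shape", "") == "Msquare":
--             if s == "validated":
--                 fin_validated += 1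
--     if fin_validated > 0 or (hx_n > 0 and hx_all_val):
--         return "Finalized"
--     if (hx_n > 0 and hx_any_hot) or (cg_n > 0 and cg_all_ok):
--         return "Validation"
--     if cg_n > 0 and cg_any_active:
--         return "Implementation"
--     return "Definition"
-- ===== Notes on version B (the rewrite author's own statement) =====
-- stated objective: simpler
-- what changed: One pass with scalar accumulators (counts and boolean flags per category) replaces building three intermediate attrs lists that are then re-scanned with any/all and set intersections.
import Mathlib
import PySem

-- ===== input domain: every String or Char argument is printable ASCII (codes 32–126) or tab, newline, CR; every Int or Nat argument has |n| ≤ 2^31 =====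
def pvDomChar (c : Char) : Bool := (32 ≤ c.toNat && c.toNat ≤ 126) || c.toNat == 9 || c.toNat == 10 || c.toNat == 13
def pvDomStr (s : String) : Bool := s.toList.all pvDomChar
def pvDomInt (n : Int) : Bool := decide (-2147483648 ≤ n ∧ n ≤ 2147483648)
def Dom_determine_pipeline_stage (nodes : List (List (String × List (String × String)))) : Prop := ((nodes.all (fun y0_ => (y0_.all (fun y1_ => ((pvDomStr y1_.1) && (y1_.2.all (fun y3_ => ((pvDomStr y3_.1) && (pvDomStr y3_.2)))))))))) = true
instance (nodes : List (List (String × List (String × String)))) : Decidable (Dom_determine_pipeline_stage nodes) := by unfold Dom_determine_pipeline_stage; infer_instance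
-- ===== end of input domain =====

-- Header: B replaces A's three intermediate attrs lists (re-scanned with any/all and set
-- intersections) by a single pass keeping scalar counters and boolean flags; objective: simpler.

-- ===== PORT A =====
def pvActiveStatuses : PySem.Set String := PySem.Set.ofList ["active", "impl_complete", "failed"]

-- one iteration of A's classification loop (appends attrs to one of the three lists)
def pvStepA (acc : List (PySem.Dict String String) × List (PySem.Dict String String) × List (PySem.Dict String String))
    (node : List (String × List (String × String))) :
    List (PySem.Dict String String) × List (PySem.Dict String String) × List (PySem.Dict String String) :=
  let attrs : PySem.Dict String String :=
    PySem.Dict.mk ((PySem.Dict.get? (PySem.Dict.mk node) "attrs").getD [])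
  let handler := attrs.getD "handler" ""
  let shape := attrs.getD "shape" ""
  if handler = "codergen" then (acc.1 ++ [attrs], acc.2.1, acc.2.2)
  else if handler = "wait.human" then (acc.1, acc.2.1 ++ [attrs], acc.2.2)
  else if handler = "finalize" ∨ shape = "Msquare" then (acc.1, acc.2.1, acc.2.2 ++ [attrs])
  else acc

def determine_pipeline_stage (nodes : List (List (String × List (String × String)))) : String :=
  let acc := nodes.foldl pvStepA ([], [], [])
  let codergen_nodes := acc.1
  let hexagon_nodes := acc.2.1
  let finalize_nodes := acc.2.2
  -- Check FINALIZED
  if finalize_nodes ≠ [] ∧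
      finalize_nodes.any (fun a => a.getD "status" "pending" == "validated") then "Finalized"
  else if hexagon_nodes ≠ [] ∧
      hexagon_nodes.all (fun a => a.getD "status" "pending" == "validated") then "Finalized"
  -- Check VALIDATION
  else if hexagon_nodes ≠ [] ∧
      (let hexagon_statuses := PySem.Set.ofList (hexagon_nodes.map (fun a => a.getD "status" "pending"));
       PySem.Set.inter pvActiveStatuses hexagon_statuses ≠ [] ∨ PySem.Set.contains hexagon_statuses "validated") then "Validation"
  else if codergen_nodes ≠ [] ∧
      codergen_nodes.all (fun a =>
        a.getD "status" "pending" == "impl_complete" || a.getD "status" "pending" == "validated") then "Validation"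
  -- Check IMPLEMENTATION
  else if codergen_nodes ≠ [] ∧
      (let codergen_statuses := PySem.Set.ofList (codergen_nodes.map (fun a => a.getD "status" "pending"));
       PySem.Set.inter pvActiveStatuses codergen_statuses ≠ []) then "Implementation"
  else "Definition"

-- ===== PORT B =====
structure PvAcc where
  cgN : Nat
  hxN : Nat
  finVal : Nat
  hxAllVal : Bool
  cgAllOk : Bool
  hxAnyHot : Bool
  cgAnyActive : Bool
deriving Repr, DecidableEq

def pvStepB (st : PvAcc) (node : List (String × List (String × String))) : PvAcc :=
  let attrs : PySem.Dict String String :=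
    PySem.Dict.mk ((PySem.Dict.get? (PySem.Dict.mk node) "attrs").getD [])
  let h := attrs.getD "handler" ""
  let s := attrs.getD "status" "pending"
  if h = "codergen" then
    { st with
      cgN := st.cgN + 1
      cgAllOk := st.cgAllOk && (s == "impl_complete" || s == "validated")
      cgAnyActive := st.cgAnyActive || (s == "active" || s == "impl_complete" || s == "failed") }
  else if h = "wait.human" then
    { st with
      hxN := st.hxN + 1
      hxAllVal := st.hxAllVal && (s == "validated")
      hxAnyHot := st.hxAnyHot || (s == "active" || s == "impl_complete" || s == "failed" || s == "validated") }
  else if h = "finalize" ∨ attrs.getD "shape" "" = "Msquare" then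
    { st with finVal := st.finVal + (if s = "validated" then 1 else 0) }
  else st

def determine_pipeline_stage_alt (nodes : List (List (String × List (String × String)))) : String :=
  let st := nodes.foldl pvStepB ⟨0, 0, 0, true, true, false, false⟩
  if st.finVal > 0 || (st.hxN > 0 && st.hxAllVal) then "Finalized"
  else if (st.hxN > 0 && st.hxAnyHot) || (st.cgN > 0 && st.cgAllOk) then "Validation"
  else if st.cgN > 0 && st.cgAnyActive then "Implementation"
  else "Definition"

-- ===== PRECONDITION & SPEC =====
-- Pre_ excludes exactly the nodes missing the "attrs" key, on which the Python A raises KeyError.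
def Pre_determine_pipeline_stage (nodes : List (List (String × List (String × String)))) : Prop :=
  (nodes.all (fun n => PySem.Dict.contains (PySem.Dict.mk n) "attrs")) = true
instance (nodes : List (List (String × List (String × String)))) : Decidable (Pre_determine_pipeline_stage nodes) := by unfold Pre_determine_pipeline_stage; infer_instance

def pvWitness_determine_pipeline_stage : (List (List (String × List (String × String)))) :=
  [[("attrs", [("handler", "codergen"), ("status", "active")])],
   [("attrs", [("handler", "wait.human"), ("status", "pending")])]]

def Spec_determine_pipeline_stage (nodes : List (List (String × List (String × String)))) (out : String) : Prop := out = determine_pipeline_stage_alt nodes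
instance (nodes : List (List (String × List (String × String)))) (out : String) : Decidable (Spec_determine_pipeline_stage nodes out) := by unfold Spec_determine_pipeline_stage; infer_instance

-- ===== CLAIM (what is proved, stated in full; the proofs are below) =====
def Claim_equal_determine_pipeline_stage : Prop := ∀ (nodes : List (List (String × List (String × String)))), Dom_determine_pipeline_stage nodes → Pre_determine_pipeline_stage nodes → Spec_determine_pipeline_stage nodes (determine_pipeline_stage nodes)

-- ===== LEMMAS AND PROOFS =====

lemma pv_chain (A1 A2 A3 A4 A5 B1 B2 B3 : Prop)
    [Decidable A1] [Decidable A2] [Decidable A3] [Decidable A4] [Decidable A5]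
    [Decidable B1] [Decidable B2] [Decidable B3]
    (h1 : A1 ∨ A2 ↔ B1) (h2 : A3 ∨ A4 ↔ B2) (h3 : A5 ↔ B3) :
    (if A1 then "Finalized" else if A2 then "Finalized" else if A3 then "Validation"
     else if A4 then "Validation" else if A5 then "Implementation" else "Definition")
    = (if B1 then "Finalized" else if B2 then "Validation" else if B3 then "Implementation"
       else "Definition") := by
  split_ifs <;> tauto

-- abstraction: B's scalar state as a function of A's three lists
def pvAbs (cg hx fin : List (PySem.Dict String String)) : PvAcc :=
  ⟨cg.length, hx.length,
   (fin.filter (fun a => a.getD "status" "pending" == "validated")).length,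
   hx.all (fun a => a.getD "status" "pending" == "validated"),
   cg.all (fun a => a.getD "status" "pending" == "impl_complete" || a.getD "status" "pending" == "validated"),
   hx.any (fun a => a.getD "status" "pending" == "active" || a.getD "status" "pending" == "impl_complete" ||
                    a.getD "status" "pending" == "failed" || a.getD "status" "pending" == "validated"),
   cg.any (fun a => a.getD "status" "pending" == "active" || a.getD "status" "pending" == "impl_complete" ||
                    a.getD "status" "pending" == "failed")⟩

lemma pvStep_abs (node : List (String × List (String × String))) (cg hx fin : List (PySem.Dict String String)) :
    pvStepB (pvAbs cg hx fin) node =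
      pvAbs (pvStepA (cg, hx, fin) node).1 (pvStepA (cg, hx, fin) node).2.1 (pvStepA (cg, hx, fin) node).2.2 := by
  simp only [pvStepA, pvStepB, pvAbs]
  split_ifs with h1 h2 h3 <;>
    simp [List.all_append, List.any_append, List.filter_append, List.filter_cons, apply_ite,
      Bool.and_comm, Bool.or_comm, Bool.or_left_comm] <;>
    try assumption

lemma pvFold_abs (nodes : List (List (String × List (String × String)))) (cg hx fin : List (PySem.Dict String String)) :
    nodes.foldl pvStepB (pvAbs cg hx fin) =
      pvAbs (nodes.foldl pvStepA (cg, hx, fin)).1 (nodes.foldl pvStepA (cg, hx, fin)).2.1 (nodes.foldl pvStepA (cg, hx, fin)).2.2 := by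
  induction nodes generalizing cg hx fin with
  | nil => rfl
  | cons n t ih =>
    simp only [List.foldl_cons, pvStep_abs]
    exact ih _ _ _

lemma pv_inter_ne (hs : List String) :
    (PySem.Set.inter pvActiveStatuses (PySem.Set.ofList hs) ≠ []) ↔
      ("active" ∈ hs ∨ "impl_complete" ∈ hs ∨ "failed" ∈ hs) := by
  simp only [Ne, List.eq_nil_iff_forall_not_mem]
  push_neg
  simp only [PySem.Set.mem_inter, PySem.Set.mem_ofList]
  constructor
  · rintro ⟨x, hx1, hx2⟩
    have hmem : x = "active" ∨ x = "impl_complete" ∨ x = "failed" := by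
      simpa [pvActiveStatuses, PySem.Set.mem_ofList] using hx1
    rcases hmem with rfl | rfl | rfl <;> tauto
  · rintro (h | h | h)
    · exact ⟨"active", by simp [pvActiveStatuses, PySem.Set.mem_ofList], h⟩
    · exact ⟨"impl_complete", by simp [pvActiveStatuses, PySem.Set.mem_ofList], h⟩
    · exact ⟨"failed", by simp [pvActiveStatuses, PySem.Set.mem_ofList], h⟩

-- ===== VERDICT (by name: the statement is the Claim_ definition above) =====
set_option maxHeartbeats 2000000 in
theorem determine_pipeline_stage_spec : Claim_equal_determine_pipeline_stage := by
  intro nodes hdom hpre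
  clear hdom hpre
  unfold Spec_determine_pipeline_stage determine_pipeline_stage determine_pipeline_stage_alt
  have habs : (⟨0, 0, 0, true, true, false, false⟩ : PvAcc) = pvAbs [] [] [] := rfl
  rw [habs, pvFold_abs]
  generalize (nodes.foldl pvStepA ([], [], [])) = acc
  obtain ⟨cg, acc2⟩ := acc
  obtain ⟨hx, fin⟩ := acc2
  simp only [pvAbs]
  have hfin : ((List.filter (fun a => a.getD "status" "pending" == "validated") fin).length > 0)
      ↔ (fin.any (fun a => a.getD "status" "pending" == "validated") = true) := by
    simp [List.length_pos_iff, List.filter_eq_nil_iff, List.any_eq_true]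
  have hfin_ne : fin.any (fun a => a.getD "status" "pending" == "validated") = true → fin ≠ [] := by
    intro h hnil; subst hnil; simp at h
  have hhx : (PySem.Set.inter pvActiveStatuses
        (PySem.Set.ofList (hx.map (fun a => a.getD "status" "pending"))) ≠ [] ∨
        PySem.Set.contains (PySem.Set.ofList (hx.map (fun a => a.getD "status" "pending"))) "validated" = true)
      ↔ (hx.any (fun a => a.getD "status" "pending" == "active" || a.getD "status" "pending" == "impl_complete" ||
            a.getD "status" "pending" == "failed" || a.getD "status" "pending" == "validated") = true) := by
    rw [pv_inter_ne, PySem.Set.contains_iff, PySem.Set.mem_ofList]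
    simp only [List.mem_map, List.any_eq_true, Bool.or_eq_true, beq_iff_eq]
    constructor
    · rintro ((⟨a, ha, he⟩ | ⟨a, ha, he⟩ | ⟨a, ha, he⟩) | ⟨a, ha, he⟩) <;> exact ⟨a, ha, by tauto⟩
    · rintro ⟨a, ha, ((he | he) | he) | he⟩
      · exact Or.inl (Or.inl ⟨a, ha, he⟩)
      · exact Or.inl (Or.inr (Or.inl ⟨a, ha, he⟩))
      · exact Or.inl (Or.inr (Or.inr ⟨a, ha, he⟩))
      · exact Or.inr ⟨a, ha, he⟩
  have hhx_ne : hx.any (fun a => a.getD "status" "pending" == "active" || a.getD "status" "pending" == "impl_complete" ||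
        a.getD "status" "pending" == "failed" || a.getD "status" "pending" == "validated") = true → hx ≠ [] := by
    intro h hnil; subst hnil; simp at h
  have hcg : (PySem.Set.inter pvActiveStatuses
        (PySem.Set.ofList (cg.map (fun a => a.getD "status" "pending"))) ≠ [])
      ↔ (cg.any (fun a => a.getD "status" "pending" == "active" || a.getD "status" "pending" == "impl_complete" ||
            a.getD "status" "pending" == "failed") = true) := by
    rw [pv_inter_ne]
    simp only [List.mem_map, List.any_eq_true, Bool.or_eq_true, beq_iff_eq]
    constructor
    · rintro (⟨a, ha, he⟩ | ⟨a, ha, he⟩ | ⟨a, ha, he⟩) <;> exact ⟨a, ha, by tauto⟩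
    · rintro ⟨a, ha, (he | he) | he⟩
      · exact Or.inl ⟨a, ha, he⟩
      · exact Or.inr (Or.inl ⟨a, ha, he⟩)
      · exact Or.inr (Or.inr ⟨a, ha, he⟩)
  have hcg_ne : cg.any (fun a => a.getD "status" "pending" == "active" || a.getD "status" "pending" == "impl_complete" ||
        a.getD "status" "pending" == "failed") = true → cg ≠ [] := by
    intro h hnil; subst hnil; simp at h
  have hlx : (0 < hx.length) ↔ hx ≠ [] := List.length_pos_iff
  have hlc : (0 < cg.length) ↔ cg ≠ [] := List.length_pos_iff
  clear habs
  simp only [Bool.or_eq_true, Bool.and_eq_true, decide_eq_true_eq, gt_iff_lt]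
  refine pv_chain _ _ _ _ _ _ _ _ ?_ ?_ ?_
  · constructor
    · rintro (⟨_, h⟩ | ⟨hne, hall⟩)
      · exact Or.inl (hfin.2 h)
      · exact Or.inr ⟨hlx.2 hne, hall⟩
    · rintro (h | ⟨hl, hall⟩)
      · exact Or.inl ⟨hfin_ne (hfin.1 h), hfin.1 h⟩
      · exact Or.inr ⟨hlx.1 hl, hall⟩
  · constructor
    · rintro (⟨hne, hc⟩ | ⟨hne, hall⟩)
      · exact Or.inl ⟨hlx.2 hne, hhx.1 hc⟩
      · exact Or.inr ⟨hlc.2 hne, hall⟩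
    · rintro (⟨hl, hany⟩ | ⟨hl, hall⟩)
      · exact Or.inl ⟨hlx.1 hl, hhx.2 hany⟩
      · exact Or.inr ⟨hlc.1 hl, hall⟩
  · constructor
    · rintro ⟨hne, hint⟩
      exact ⟨hlc.2 hne, hcg.1 hint⟩
    · rintro ⟨hl, hany⟩
      exact ⟨hlc.1 hl, hcg.2 hany⟩
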